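-- pv_equiv track=rewrite | github.com/senuamedia/lab | validation/cgeom_independent.py | shell_from_r3
-- ===== SOURCE A (Python) =====
-- def shell_from_r3(r3, S):
--     """Compute M_S by summing r_3(n) over n in shell S."""
--     M_S = 0
--     n_min = S*S - S + 1
--     n_max = S*S + S
--     # Handle S=0: the single mode k=0, excluded
--     if S == 0:
--         return 0
--     for n in range(max(1, n_min), n_max + 1):
--         M_S += r3.get(n, 0)
--     return M_S
-- ===== SOURCE B (Python) =====
-- def shell_from_r3(r3, S):
--     """Compute M_S by summing r_3(n) over n in shell S (iterate the dict, not the index range)."""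
--     lo = max(1, S*S - S + 1)
--     hi = S*S + S
--     M_S = 0
--     for k, v in r3.items():
--         if lo <= k <= hi:
--             M_S += v
--     return M_S
-- ===== Notes on version B (the rewrite author's own statement) =====
-- stated objective: alternative
-- what changed: B iterates once over the dict's items and sums values whose key lies in the closed-form shell bounds [max(1,S*S-S+1), S*S+S], instead of looping over the integer index range and probing the dict at each n; the S==0 early return disappears because the bounds are then empty.
import Mathlib
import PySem

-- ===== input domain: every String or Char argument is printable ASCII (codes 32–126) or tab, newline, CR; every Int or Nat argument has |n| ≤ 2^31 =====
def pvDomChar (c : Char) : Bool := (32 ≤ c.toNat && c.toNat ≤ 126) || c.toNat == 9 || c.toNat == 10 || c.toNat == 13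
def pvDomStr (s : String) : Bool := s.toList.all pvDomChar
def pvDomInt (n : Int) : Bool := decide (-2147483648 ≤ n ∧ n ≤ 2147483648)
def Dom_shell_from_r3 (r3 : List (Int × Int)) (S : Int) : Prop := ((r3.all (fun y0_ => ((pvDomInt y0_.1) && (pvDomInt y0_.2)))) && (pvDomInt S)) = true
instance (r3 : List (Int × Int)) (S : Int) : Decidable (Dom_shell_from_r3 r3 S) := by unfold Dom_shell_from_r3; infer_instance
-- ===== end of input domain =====

-- B iterates once over the dict's items, summing values whose key lies in the closed-form shell
-- bounds, instead of scanning the integer index range and probing the dict at each n (alternative).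


-- ===== PORT A =====
def shell_from_r3 (r3 : List (Int × Int)) (S : Int) : Int :=
  let M_S : Int := 0
  let n_min := S * S - S + 1
  let n_max := S * S + S
  if S = 0 then 0
  else
    (PySem.List.pyRange (max 1 n_min) (n_max + 1) 1).foldl
      (fun M n => M + (PySem.Dict.mk r3).getD n 0) M_S

-- ===== PORT B =====
def shell_from_r3_alt (r3 : List (Int × Int)) (S : Int) : Int :=
  let lo := max 1 (S * S - S + 1)
  let hi := S * S + S
  r3.foldl (fun M kv => if lo ≤ kv.1 ∧ kv.1 ≤ hi then M + kv.2 else M) 0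

-- ===== PRECONDITION & SPEC =====
-- Pre_ excludes association lists with duplicate keys: they represent no Python dict (the inputs
-- are dicts, whose keys are unique), and on them A's first-match lookup vs B's sum over all items
-- are both accidental.
def Pre_shell_from_r3 (r3 : List (Int × Int)) (S : Int) : Prop := (r3.map Prod.fst).Nodup
instance (r3 : List (Int × Int)) (S : Int) : Decidable (Pre_shell_from_r3 r3 S) := by unfold Pre_shell_from_r3; infer_instance

def pvWitness_shell_from_r3 : (List (Int × Int)) × Int := ([(1, 2), (3, 4), (7, 9)], 2)

def Spec_shell_from_r3 (r3 : List (Int × Int)) (S : Int) (out : Int) : Prop := out = shell_from_r3_alt r3 S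
instance (r3 : List (Int × Int)) (S : Int) (out : Int) : Decidable (Spec_shell_from_r3 r3 S out) := by unfold Spec_shell_from_r3; infer_instance

-- ===== CLAIM (what is proved, stated in full; the proofs are below) =====
def Claim_equal_shell_from_r3 : Prop := ∀ (r3 : List (Int × Int)) (S : Int), Dom_shell_from_r3 r3 S → Pre_shell_from_r3 r3 S → Spec_shell_from_r3 r3 S (shell_from_r3 r3 S)

-- ===== LEMMAS AND PROOFS =====

-- summing (if n = k then v else 0) over a duplicate-free list picks out v iff k is present
lemma sum_map_ite_eq_key (xs : List Int) (k v : Int) (hnd : xs.Nodup) :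
    (xs.map (fun n => if n = k then v else 0)).sum = if k ∈ xs then v else 0 := by
  induction xs with
  | nil => simp
  | cons x t ih =>
    rcases List.nodup_cons.mp hnd with ⟨hx, ht⟩
    by_cases hxk : x = k
    · subst hxk
      simp [List.mem_cons, hx, ih ht]
    · simp [List.mem_cons, hxk, Ne.symm hxk, ih ht]

-- a key absent from the association list looks up to the default
lemma getD_mk_of_not_mem (t : List (Int × Int)) (k : Int) (hk : k ∉ t.map Prod.fst) :
    (PySem.Dict.mk t).getD k 0 = 0 := by
  induction t with
  | nil => rfl
  | cons p t ih =>
    obtain ⟨a, b⟩ := p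
    simp only [List.map_cons, List.mem_cons, not_or] at hk
    have h0 := ih hk.2
    simp only [PySem.Dict.getD] at h0 ⊢
    simp [PySem.Dict.get?_mk_cons, Ne.symm hk.1, h0]

-- probing each n of the range equals summing the filtered items, given duplicate-free keys
lemma sum_probe_eq_sum_items (l : List (Int × Int)) (lo hi : Int)
    (hnd : (l.map Prod.fst).Nodup) :
    ((PySem.List.pyRange lo (hi + 1) 1).map (fun n => (PySem.Dict.mk l).getD n 0)).sum
      = (l.map (fun kv => if lo ≤ kv.1 ∧ kv.1 ≤ hi then kv.2 else 0)).sum := by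
  induction l with
  | nil =>
    simp [PySem.Dict.getD, PySem.Dict.get?]
  | cons p t ih =>
    obtain ⟨k, v⟩ := p
    rw [List.map_cons] at hnd
    rcases List.nodup_cons.mp hnd with ⟨hp, ht⟩
    have hgd : ∀ n : Int, (PySem.Dict.mk ((k, v) :: t)).getD n 0
        = (PySem.Dict.mk t).getD n 0 + (if n = (k, v).1 then (k, v).2 else 0) := by
      intro n
      by_cases h : n = k
      · subst h
        have h0 := getD_mk_of_not_mem t n hp
        simp only [PySem.Dict.getD] at h0
        simp [PySem.Dict.getD, PySem.Dict.get?_mk_cons, h0]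
      · simp [PySem.Dict.getD, PySem.Dict.get?_mk_cons, Ne.symm h, h]
    have hmem : k ∈ PySem.List.pyRange lo (hi + 1) 1 ↔ lo ≤ k ∧ k ≤ hi := by
      rw [PySem.List.mem_pyRange_one]
      omega
    calc ((PySem.List.pyRange lo (hi + 1) 1).map
            (fun n => (PySem.Dict.mk ((k, v) :: t)).getD n 0)).sum
        = ((PySem.List.pyRange lo (hi + 1) 1).map
            (fun n => (PySem.Dict.mk t).getD n 0 + (if n = (k, v).1 then (k, v).2 else 0))).sum := by
          simp only [hgd]
      _ = ((PySem.List.pyRange lo (hi + 1) 1).map (fun n => (PySem.Dict.mk t).getD n 0)).sum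
          + ((PySem.List.pyRange lo (hi + 1) 1).map (fun n => if n = (k, v).1 then (k, v).2 else 0)).sum :=
          PySem.List.sum_map_add_int _ _ _
      _ = (((k, v) :: t).map (fun kv => if lo ≤ kv.1 ∧ kv.1 ≤ hi then kv.2 else 0)).sum := by
          rw [ih ht, sum_map_ite_eq_key _ _ _ (PySem.List.nodup_pyRange_one lo (hi + 1))]
          by_cases h : lo ≤ k ∧ k ≤ hi <;>
            simp [List.map_cons, hmem, h, add_comm]

-- the two foldl loops compute those sums
lemma range_probe_eq_item_scan (l : List (Int × Int)) (lo hi : Int)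
    (hnd : (l.map Prod.fst).Nodup) :
    (PySem.List.pyRange lo (hi + 1) 1).foldl (fun M n => M + (PySem.Dict.mk l).getD n 0) 0
      = l.foldl (fun M kv => if lo ≤ kv.1 ∧ kv.1 ≤ hi then M + kv.2 else M) 0 := by
  have hA := PySem.List.foldl_add (PySem.List.pyRange lo (hi + 1) 1)
      (fun n => (PySem.Dict.mk l).getD n 0) 0
  have hB := PySem.List.foldl_add l
      (fun kv : Int × Int => if lo ≤ kv.1 ∧ kv.1 ≤ hi then kv.2 else 0) 0
  simp only [zero_add] at hA hB
  have hBfun : l.foldl (fun M kv => if lo ≤ kv.1 ∧ kv.1 ≤ hi then M + kv.2 else M) 0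
      = l.foldl (fun M kv => M + (if lo ≤ kv.1 ∧ kv.1 ≤ hi then kv.2 else 0)) 0 := by
    congr 1
    funext M kv
    by_cases h : lo ≤ kv.1 ∧ kv.1 ≤ hi <;> simp [h]
  rw [hA, hBfun, hB]
  exact sum_probe_eq_sum_items l lo hi hnd

-- ===== VERDICT (by name: the statement is the Claim_ definition above) =====
theorem shell_from_r3_spec : Claim_equal_shell_from_r3 := by
  intro r3 S _hdom hpre
  unfold Spec_shell_from_r3 shell_from_r3 shell_from_r3_alt
  by_cases hS : S = 0
  · subst hS
    have hfold : ∀ (l : List (Int × Int)) (c : Int),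
        l.foldl (fun M kv => if 1 ≤ kv.1 ∧ kv.1 ≤ 0 then M + kv.2 else M) c = c := by
      intro l
      induction l with
      | nil => intro c; rfl
      | cons q l ih =>
        intro c
        have hq : ¬ (1 ≤ q.1 ∧ q.1 ≤ 0) := by omega
        simp [List.foldl_cons, hq, ih]
    norm_num
    exact (hfold r3 0).symm
  · simp only [hS, if_false]
    exact range_probe_eq_item_scan r3 _ _ hpre
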